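-- pv_equiv track=rewrite | github.com/yrrah/cs6620-fall21-intelligent-assignment-of-data-to-dedup-nodes | simulator/front_end/src/front_end/region_creation/input_streams.py | joinit
-- ===== SOURCE A (Python) =====
-- def joinit(iterable, delimiter):
--     it = iter(iterable)
--     count = 0
--     for x in it:
--         if count % 2 == 0 and count > 0:
--             yield delimiter
--         yield x
--         count += 1
-- ===== SOURCE B (Python) =====
-- def joinit(iterable, delimiter):
--     # Chunk-of-two decomposition: yield the delimiter before every pair of
--     # elements except the first pair; stays lazy.
--     it = iter(iterable)
--     first = True
--     while True:
--         chunk = []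
--         for _ in range(2):
--             try:
--                 chunk.append(next(it))
--             except StopIteration:
--                 break
--         if not chunk:
--             return
--         if not first:
--             yield delimiter
--         first = False
--         yield from chunk
-- ===== Notes on version B (the rewrite author's own statement) =====
-- stated objective: alternative
-- what changed: Replaces the per-element parity counter with a chunk-of-two consumer: pull pairs from the iterator and emit the delimiter before every chunk after the first, so no index bookkeeping is kept.
import Mathlib
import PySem

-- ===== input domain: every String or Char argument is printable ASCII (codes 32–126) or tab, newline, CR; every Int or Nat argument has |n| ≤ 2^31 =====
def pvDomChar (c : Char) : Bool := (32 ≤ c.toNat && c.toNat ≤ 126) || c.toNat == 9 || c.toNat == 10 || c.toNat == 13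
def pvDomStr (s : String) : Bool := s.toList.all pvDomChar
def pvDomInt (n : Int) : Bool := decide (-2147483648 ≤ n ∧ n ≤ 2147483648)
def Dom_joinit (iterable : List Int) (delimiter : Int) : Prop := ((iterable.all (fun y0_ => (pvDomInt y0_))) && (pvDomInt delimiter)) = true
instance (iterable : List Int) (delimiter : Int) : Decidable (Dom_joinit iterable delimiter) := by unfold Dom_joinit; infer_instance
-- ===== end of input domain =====

-- B replaces A's per-element parity counter by consuming the list in chunks of two,
-- emitting the delimiter before every chunk after the first (objective: alternative decomposition).

-- ===== PORT A =====
-- literal port of A's generator loop: fold over the elements carrying (output, count)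
def joinit (iterable : List Int) (delimiter : Int) : List Int :=
  (iterable.foldl
    (fun (st : List Int × Int) x =>
      let out := st.1
      let count := st.2
      let out := if count % 2 = 0 ∧ count > 0 then out ++ [delimiter] else out
      (out ++ [x], count + 1))
    ([], 0)).1

-- ===== PORT B =====
-- Source B's loop after the first chunk: delimiter before each pair (or trailing single)
def joinit_altAux (delimiter : Int) : List Int → List Int
  | [] => []
  | [x] => [delimiter, x]
  | x :: y :: rest => delimiter :: x :: y :: joinit_altAux delimiter rest

def joinit_alt (iterable : List Int) (delimiter : Int) : List Int :=
  match iterable with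
  | [] => []
  | [x] => [x]
  | x :: y :: rest => x :: y :: joinit_altAux delimiter rest

-- ===== PRECONDITION & SPEC =====
def Spec_joinit (iterable : List Int) (delimiter : Int) (out : List Int) : Prop := out = joinit_alt iterable delimiter
instance (iterable : List Int) (delimiter : Int) (out : List Int) : Decidable (Spec_joinit iterable delimiter out) := by unfold Spec_joinit; infer_instance

-- ===== CLAIM (what is proved, stated in full; the proofs are below) =====
def Claim_equal_joinit : Prop := ∀ (iterable : List Int) (delimiter : Int), Dom_joinit iterable delimiter → Spec_joinit iterable delimiter (joinit iterable delimiter)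

-- ===== LEMMAS AND PROOFS =====

-- recursive characterisation of A's loop body
def joinitGo (delimiter : Int) (count : Int) : List Int → List Int
  | [] => []
  | x :: rest =>
      (if count % 2 = 0 ∧ count > 0 then [delimiter] else []) ++ x :: joinitGo delimiter (count + 1) rest

theorem joinit_foldl_eq_go (delimiter : Int) (l : List Int) :
    ∀ (out : List Int) (count : Int),
      (l.foldl
        (fun (st : List Int × Int) x =>
          let out := st.1
          let count := st.2
          let out := if count % 2 = 0 ∧ count > 0 then out ++ [delimiter] else out
          (out ++ [x], count + 1))
        (out, count)).1 = out ++ joinitGo delimiter count l := by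
  induction l with
  | nil => intro out count; simp [joinitGo]
  | cons x rest ih =>
      intro out count
      simp only [List.foldl_cons, joinitGo]
      rw [ih]
      split_ifs with h <;> simp

theorem joinitGo_even_pos (delimiter : Int) :
    ∀ (l : List Int) (count : Int), count % 2 = 0 → count > 0 →
      joinitGo delimiter count l = joinit_altAux delimiter l := by
  intro l
  induction l using joinit_altAux.induct with
  | case1 => intro count _ _; simp [joinitGo, joinit_altAux]
  | case2 x =>
      intro count h0 h1
      simp [joinitGo, joinit_altAux, h0, h1]
  | case3 x y rest ih =>
      intro count h0 h1
      have hodd : ¬ ((count + 1) % 2 = 0 ∧ count + 1 > 0) := by omega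
      simp only [joinitGo, joinit_altAux]
      rw [if_pos ⟨h0, h1⟩, if_neg hodd, ih (count + 1 + 1) (by omega) (by omega)]
      simp

-- ===== VERDICT (by name: the statement is the Claim_ definition above) =====
theorem joinit_spec : Claim_equal_joinit := by
  intro iterable delimiter _
  unfold Spec_joinit joinit
  rw [joinit_foldl_eq_go]
  match iterable with
  | [] => simp [joinitGo, joinit_alt]
  | [x] => simp [joinitGo, joinit_alt]
  | x :: y :: rest =>
      simp only [joinitGo, joinit_alt, List.nil_append]
      rw [joinitGo_even_pos delimiter rest (0 + 1 + 1) (by omega) (by omega)]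
      norm_num
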